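-- pv_equiv track=rewrite | github.com/lewis6991/tcl-ls | src/tcl_lsp/lsp/features/completion.py | _live_variable_prefix
-- ===== SOURCE A (Python) =====
-- def _live_variable_prefix(prefix_text: str) -> str | None:
--     if prefix_text.endswith('${') or prefix_text.endswith('$'):
--         return ''
--
--     open_brace_index = prefix_text.rfind('${')
--     if open_brace_index >= 0 and '}' not in prefix_text[open_brace_index + 2 :]:
--         return prefix_text[open_brace_index + 2 :]
--
--     dollar_index = prefix_text.rfind('$')
--     if dollar_index < 0:
--         return None
--
--     variable_prefix = prefix_text[dollar_index + 1 :]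
--     if not variable_prefix:
--         return None
--     if all(char.isalnum() or char in {'_', ':'} for char in variable_prefix):
--         return variable_prefix
--     return None
-- ===== SOURCE B (Python) =====
-- def _live_variable_prefix(prefix_text: str) -> str | None:
--     # Single right-to-left scan instead of rfind/slice passes.
--     if prefix_text.endswith('${') or prefix_text.endswith('$'):
--         return ''
--     n = len(prefix_text)
--     brace_bad = False      # a '}' lies between the current position and the end
--     dollar_seen = False
--     pending = None         # result of the plain-'$' branch, fixed at the last '$'
--     word_ok = True         # every char after the current position is alnum/'_'/':'
--     for j in range(n - 1, -1, -1):
--         ch = prefix_text[j]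
--         if ch == '$' and j + 1 < n and prefix_text[j + 1] == '{':
--             # this is the last '${' of the text
--             return prefix_text[j + 2:] if not brace_bad else pending
--         if ch == '}':
--             brace_bad = True
--         if ch == '$' and not dollar_seen:
--             dollar_seen = True
--             if word_ok and j + 1 < n:
--                 pending = prefix_text[j + 1:]
--         elif not dollar_seen and not (ch.isalnum() or ch in ('_', ':')):
--             word_ok = False
--     return pending
-- ===== Notes on version B (the rewrite author's own statement) =====
-- stated objective: alternative
-- what changed: A locates the last brace-opening marker and the last dollar sign with two rfind passes and then slices and re-validates the suffix separately; B makes a single right-to-left index scan, maintaining the pending plain-dollar result, a seen-closing-brace flag and a word-character flag, and decides at the first opening marker it meets.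
import Mathlib
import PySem

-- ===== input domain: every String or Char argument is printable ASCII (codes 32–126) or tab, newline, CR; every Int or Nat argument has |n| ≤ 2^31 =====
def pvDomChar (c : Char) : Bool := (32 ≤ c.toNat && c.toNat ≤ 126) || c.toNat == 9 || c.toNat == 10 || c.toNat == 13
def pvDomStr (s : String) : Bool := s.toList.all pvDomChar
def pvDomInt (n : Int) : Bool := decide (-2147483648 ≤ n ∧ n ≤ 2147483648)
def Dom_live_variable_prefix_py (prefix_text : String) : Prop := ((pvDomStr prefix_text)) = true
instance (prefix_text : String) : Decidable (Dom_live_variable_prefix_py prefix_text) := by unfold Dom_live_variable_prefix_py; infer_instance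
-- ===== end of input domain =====

-- B replaces A's rfind/slice multi-pass extraction by a single right-to-left scan (alternative decomposition, same cost).


-- ===== PORT A =====
def live_variable_prefix_py (prefix_text : String) : Option String :=
  let cs := prefix_text.toList
  if PySem.Chars.endswith cs ['$', '{'] || PySem.Chars.endswith cs ['$'] then
    some ""
  else
    let openBraceIndex := PySem.Chars.rfind cs ['$', '{']
    if 0 ≤ openBraceIndex ∧
        PySem.Chars.isIn ['}'] (PySem.List.slice cs (some (openBraceIndex + 2)) none) = false then
      some (String.ofList (PySem.List.slice cs (some (openBraceIndex + 2)) none))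
    else
      let dollarIndex := PySem.Chars.rfind cs ['$']
      if dollarIndex < 0 then
        none
      else
        let variablePrefix := PySem.List.slice cs (some (dollarIndex + 1)) none
        if variablePrefix = [] then
          none
        else if variablePrefix.all (fun c => PySem.Chars.isalnum c || (c == '_' || c == ':')) then
          some (String.ofList variablePrefix)
        else
          none

-- ===== PORT B =====
-- single right-to-left index scan (Source B's loop); counter = number of unscanned leading chars
def lvpScan (t : List Char) : Nat → Bool → Bool → Option (List Char) → Bool →
    Option (List Char)
  | 0, _braceBad, _dollarSeen, pending, _wordOk => pending
  | k + 1, braceBad, dollarSeen, pending, wordOk =>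
    let ch := t.getD k ' '
    if ch = '$' ∧ t[k + 1]? = some '{' then
      if braceBad then pending else some (PySem.List.slice t (some ((k : Int) + 2)) none)
    else
      let braceBad' := if ch = '}' then true else braceBad
      if ch = '$' ∧ dollarSeen = false then
        lvpScan t k braceBad' true
          (if wordOk ∧ k + 1 < t.length then some (PySem.List.slice t (some ((k : Int) + 1)) none)
           else pending)
          wordOk
      else if dollarSeen = false ∧ ¬(PySem.Chars.isalnum ch || (ch == '_' || ch == ':')) = true then
        lvpScan t k braceBad' dollarSeen pending false
      else
        lvpScan t k braceBad' dollarSeen pending wordOk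

def live_variable_prefix_py_alt (prefix_text : String) : Option String :=
  let cs := prefix_text.toList
  if PySem.Chars.endswith cs ['$', '{'] || PySem.Chars.endswith cs ['$'] then
    some ""
  else
    (lvpScan cs cs.length false false none true).map String.ofList

-- ===== PRECONDITION & SPEC =====
def Spec_live_variable_prefix_py (prefix_text : String) (out : Option String) : Prop := out = live_variable_prefix_py_alt prefix_text
instance (prefix_text : String) (out : Option String) : Decidable (Spec_live_variable_prefix_py prefix_text out) := by unfold Spec_live_variable_prefix_py; infer_instance

-- ===== CLAIM (what is proved, stated in full; the proofs are below) =====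
def Claim_equal_live_variable_prefix_py : Prop := ∀ (prefix_text : String), Dom_live_variable_prefix_py prefix_text → Spec_live_variable_prefix_py prefix_text (live_variable_prefix_py prefix_text)

-- ===== LEMMAS AND PROOFS =====

-- word characters of the Tcl variable name
def lvpWordc (c : Char) : Bool := PySem.Chars.isalnum c || (c == '_' || c == ':')

-- the segment of l strictly after its LAST '$' (all of l if there is none)
def lvpAfterD : List Char → List Char
  | [] => []
  | c :: s => if '$' ∈ s then lvpAfterD s else if c = '$' then s else c :: s

-- the plain-'$' branch result
def lvpDres (l : List Char) : Option (List Char) :=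
  if '$' ∈ l then
    (if lvpAfterD l ≠ [] ∧ (lvpAfterD l).all lvpWordc then some (lvpAfterD l) else none)
  else none

-- the segment after the LAST '${' of l (none if there is no '${')
def lvpLps : List Char → Option (List Char)
  | [] => none
  | [_] => none
  | a :: b :: t =>
    match lvpLps (b :: t) with
    | some x => some x
    | none => if a = '$' ∧ b = '{' then some t else none

def lvpPairFree : List Char → Bool
  | [] => true
  | [_] => true
  | a :: b :: t => !(decide (a = '$') && decide (b = '{')) && lvpPairFree (b :: t)

-- what both ports compute after the endswith-guard
def lvpSpec (l : List Char) : Option (List Char) :=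
  match lvpLps l with
  | some x => if '}' ∈ x then lvpDres l else some x
  | none => lvpDres l

theorem lvpLps_cons (c : Char) (m : List Char) (h : m ≠ []) :
    lvpLps (c :: m) =
      match lvpLps m with
      | some x => some x
      | none => if c = '$' ∧ m.head? = some '{' then some m.tail else none := by
  cases m with
  | nil => exact absurd rfl h
  | cons b t => simp [lvpLps]

theorem lvpPairFree_lps (s : List Char) (h : lvpPairFree s = true) : lvpLps s = none := by
  induction s with
  | nil => rfl
  | cons a t ih =>
    cases t with
    | nil => rfl
    | cons b t' =>
      simp only [lvpPairFree, Bool.and_eq_true, Bool.not_eq_true'] at h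
      rw [lvpLps_cons a (b :: t') (by simp), ih h.2]
      simp only [List.head?_cons]
      have : ¬(a = '$' ∧ b = '{') := by
        intro ⟨h1, h2⟩
        simp [h1, h2] at h
      simp [this]

theorem lvpAfterD_of_not_mem (s : List Char) (h : '$' ∉ s) : lvpAfterD s = s := by
  cases s with
  | nil => rfl
  | cons c t =>
    have h1 : '$' ∉ t := fun hm => h (List.mem_cons_of_mem _ hm)
    have h2 : c ≠ '$' := fun hc => h (hc ▸ List.mem_cons_self)
    simp [lvpAfterD, h1, h2]

theorem lvpAfterD_append_mem (s : List Char) (h : '$' ∈ s) :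
    ∀ l, lvpAfterD (l ++ s) = lvpAfterD s := by
  intro l
  induction l with
  | nil => rfl
  | cons c l' ih =>
    have : '$' ∈ l' ++ s := List.mem_append_right _ h
    simp [lvpAfterD, this, ih]

theorem lvpAfterD_append_dollar (s : List Char) (h : '$' ∉ s) :
    ∀ l, lvpAfterD (l ++ '$' :: s) = s := by
  intro l
  induction l with
  | nil => simp [lvpAfterD, h]
  | cons c l' ih =>
    have : '$' ∈ l' ++ '$' :: s := List.mem_append_right _ List.mem_cons_self
    simp only [List.cons_append, lvpAfterD, this, if_true]
    exact ih

theorem lvpDres_append_mem (l s : List Char) (h : '$' ∈ s) : lvpDres (l ++ s) = lvpDres s := by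
  simp [lvpDres, lvpAfterD_append_mem s h l, h]

theorem lvpPair_lps (rest : List Char) (h : lvpPairFree ('{' :: rest) = true) :
    ∀ l, lvpLps (l ++ '$' :: '{' :: rest) = some rest := by
  intro l
  induction l with
  | nil =>
    have := lvpPairFree_lps _ h
    simp [lvpLps_cons '$' ('{' :: rest) (by simp), this]
  | cons a l' ih =>
    rw [List.cons_append, lvpLps_cons a _ (by simp), ih]

-- ch::s remains '${'-free when the scan does not trigger on ch
theorem lvpPairFree_cons (ch : Char) (s : List Char) (hs : lvpPairFree s = true)
    (h : ¬(ch = '$' ∧ s.head? = some '{')) : lvpPairFree (ch :: s) = true := by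
  cases s with
  | nil => rfl
  | cons b t =>
    simp only [List.head?_cons] at h
    simp only [lvpPairFree, Bool.and_eq_true, Bool.not_eq_true']
    constructor
    · by_cases h1 : ch = '$'
      · have h2 : b ≠ '{' := fun hb => h ⟨h1, by rw [hb]⟩
        simp [h2]
      · simp [h1]
    · exact hs

-- main characterisation of B's scan
theorem lvpScan_succ (t : List Char) (k : Nat) (bb ds : Bool) (pending : Option (List Char))
    (wok : Bool) :
    lvpScan t (k + 1) bb ds pending wok =
      (let ch := t.getD k ' '
       if ch = '$' ∧ t[k + 1]? = some '{' then
         if bb then pending else some (PySem.List.slice t (some ((k : Int) + 2)) none)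
       else
         let braceBad' := if ch = '}' then true else bb
         if ch = '$' ∧ ds = false then
           lvpScan t k braceBad' true
             (if wok ∧ k + 1 < t.length then some (PySem.List.slice t (some ((k : Int) + 1)) none)
              else pending)
             wok
         else if ds = false ∧ ¬(PySem.Chars.isalnum ch || (ch == '_' || ch == ':')) = true then
           lvpScan t k braceBad' ds pending false
         else
           lvpScan t k braceBad' ds pending wok) := rfl

theorem lvpScan_spec (t : List Char) : ∀ (k : Nat), k ≤ t.length →
    lvpPairFree (t.drop k) = true →
    lvpScan t k (decide ('}' ∈ t.drop k)) (decide ('$' ∈ t.drop k)) (lvpDres (t.drop k))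
      ((lvpAfterD (t.drop k)).all lvpWordc) = lvpSpec t := by
  intro k
  induction k with
  | zero =>
    intro _ h
    simp only [lvpScan, List.drop_zero, lvpSpec, lvpPairFree_lps t h]
  | succ k ih =>
    intro hk hs
    have hklt : k < t.length := by omega
    set s := t.drop (k + 1) with hsdef
    have hdrop : t.drop k = t[k] :: s := List.drop_eq_getElem_cons hklt
    have hch : t.getD k ' ' = t[k] := List.getD_eq_getElem t ' ' hklt
    have hhd : t[k + 1]? = s.head? := List.head?_drop.symm
    have hsl1 : PySem.List.slice t (some ((k : Int) + 1)) none = s := by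
      rw [show ((k : Int) + 1) = ((k + 1 : Nat) : Int) by push_cast; ring,
        PySem.List.slice_from_natCast]
    have hsne : s ≠ [] ↔ k + 1 < t.length := by
      rw [hsdef, ne_eq, List.drop_eq_nil_iff]
      omega
    set ch := t[k] with hchdef
    by_cases hpair : ch = '$' ∧ s.head? = some '{'
    · obtain ⟨hcheq, hhd2⟩ := hpair
      obtain ⟨rest, hrest⟩ : ∃ rest, s = '{' :: rest := by
        cases hcs : s with
        | nil => rw [hcs] at hhd2; simp at hhd2
        | cons a u =>
          rw [hcs] at hhd2
          simp only [List.head?_cons, Option.some.injEq] at hhd2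
          exact ⟨u, by rw [hhd2]⟩
      have hsl2 : PySem.List.slice t (some ((k : Int) + 2)) none = rest := by
        have : s.tail = PySem.List.slice t (some ((k : Int) + 2)) none := by
          rw [show ((k : Int) + 2) = ((k + 2 : Nat) : Int) by push_cast; ring,
            PySem.List.slice_from_natCast, hsdef, List.tail_drop]
        rw [hrest] at this
        simpa using this.symm
      have hsplit : t = t.take k ++ '$' :: '{' :: rest := by
        conv_lhs => rw [← List.take_append_drop k t]
        rw [hdrop, hcheq, hrest]
      rw [lvpScan_succ]
      simp only [hch, hhd]
      rw [if_pos ⟨hcheq, hhd2⟩]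
      rw [hrest] at hs ⊢
      rw [show lvpSpec t = if '}' ∈ rest then lvpDres t else some rest by
          conv_lhs => rw [hsplit]
          simp only [lvpSpec, lvpPair_lps rest hs (t.take k)]
          rw [← hsplit]]
      by_cases hbr : '}' ∈ rest
      · rw [if_pos (by simp [hbr]), if_pos hbr]
        by_cases hd : '$' ∈ '{' :: rest
        · conv_rhs => rw [hsplit]
          rw [show t.take k ++ '$' :: '{' :: rest = (t.take k ++ ['$']) ++ ('{' :: rest) by simp,
            lvpDres_append_mem _ _ hd]
        · have h1 : lvpDres ('{' :: rest) = none := by simp [lvpDres, hd]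
          have h2 : lvpAfterD t = '{' :: rest := by
            conv_lhs => rw [hsplit]
            exact lvpAfterD_append_dollar _ hd (t.take k)
          have h3 : ('{' :: rest).all lvpWordc = false := by
            simp [List.all_cons, lvpWordc, PySem.Chars.isalnum, PySem.Chars.isalpha,
              PySem.Chars.isupper, PySem.Chars.islower, PySem.Chars.isdigit]
          rw [h1, show lvpDres t = none by simp [lvpDres, h2, h3]]
      · rw [if_neg (by simp [hbr]), if_neg hbr, hsl2]
    · rw [lvpScan_succ]
      simp only [hch, hhd]
      rw [if_neg hpair]
      have hbb : (if ch = '}' then true else decide ('}' ∈ s)) = decide ('}' ∈ ch :: s) := by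
        by_cases h : ch = '}'
        · simp [h]
        · simp only [List.mem_cons, h, if_false, decide_eq_decide]
          constructor
          · intro hm; exact Or.inr hm
          · intro hm
            rcases hm with hm | hm
            · exact absurd hm.symm h
            · exact hm
      have hpf : lvpPairFree (ch :: s) = true := lvpPairFree_cons ch s hs hpair
      have IH := ih (by omega) (by rw [hdrop]; exact hpf)
      rw [hdrop] at IH
      simp only [hbb, hsl1]
      by_cases hb1 : ch = '$' ∧ decide ('$' ∈ s) = false
      · obtain ⟨hcheq, hds⟩ := hb1
        rw [decide_eq_false_iff_not] at hds
        have hads : lvpAfterD s = s := lvpAfterD_of_not_mem s hds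
        have ha : lvpAfterD ('$' :: s) = s := by simp [lvpAfterD, hds]
        have h1 : decide ('$' ∈ '$' :: s) = true := by simp
        have hrhs : lvpDres ('$' :: s) = if s ≠ [] ∧ s.all lvpWordc then some s else none := by
          rw [lvpDres, ha]
          simp
        have h2 : (if (lvpAfterD s).all lvpWordc ∧ k + 1 < t.length then some s else lvpDres s)
            = lvpDres ('$' :: s) := by
          rw [hads, show lvpDres s = none by simp [lvpDres, hds], hrhs]
          by_cases hk2 : k + 1 < t.length
          · have hne := hsne.mpr hk2
            by_cases hw : s.all lvpWordc <;> simp [hk2, hne, hw]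
          · have he : s = [] := by
              by_contra hne
              exact hk2 (hsne.mp hne)
            simp [hk2, he]
        have h3 : (lvpAfterD s).all lvpWordc = (lvpAfterD ('$' :: s)).all lvpWordc := by
          rw [hads, ha]
        rw [if_pos (show ch = '$' ∧ decide ('$' ∈ s) = false from ⟨hcheq, by simp [hds]⟩),
          h2, h3]
        rw [hcheq] at IH ⊢
        rw [h1] at IH
        exact IH
      · rw [if_neg hb1]
        by_cases hb2 : decide ('$' ∈ s) = false ∧
            ¬(PySem.Chars.isalnum ch || (ch == '_' || ch == ':')) = true
        · obtain ⟨hds', hw⟩ := hb2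
          rw [decide_eq_false_iff_not] at hds'
          have hchne : ch ≠ '$' := by
            intro h; exact hb1 ⟨h, by simp [hds']⟩
          have hdsc : '$' ∉ ch :: s := by simp [Ne.symm hchne, hds']
          have h1 : decide ('$' ∈ ch :: s) = decide ('$' ∈ s) := by simp [Ne.symm hchne]
          have h2 : lvpDres s = lvpDres (ch :: s) := by simp [lvpDres, hds', hdsc]
          have hwf : lvpWordc ch = false := by
            simp only [lvpWordc]
            exact Bool.eq_false_iff.mpr hw
          have h3 : (lvpAfterD (ch :: s)).all lvpWordc = false := by
            rw [lvpAfterD_of_not_mem _ hdsc]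
            simp [hwf]
          rw [if_pos ⟨by simp [hds'], hw⟩, h2, ← h3, ← h1]
          exact IH
        · rw [if_neg hb2]
          by_cases hds : '$' ∈ s
          · have h1 : decide ('$' ∈ ch :: s) = decide ('$' ∈ s) := by simp [hds]
            have h2 : lvpAfterD (ch :: s) = lvpAfterD s := by simp [lvpAfterD, hds]
            have h3 : lvpDres (ch :: s) = lvpDres s := lvpDres_append_mem [ch] s hds
            rw [← h3, show (lvpAfterD s).all lvpWordc = (lvpAfterD (ch :: s)).all lvpWordc by
              rw [h2], ← h1]
            exact IH
          · have hchne : ch ≠ '$' := by intro h; exact hb1 ⟨h, by simp [hds]⟩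
            have hw : (PySem.Chars.isalnum ch || (ch == '_' || ch == ':')) = true := by
              by_contra h
              exact hb2 ⟨by simp [hds], h⟩
            have hdsc : '$' ∉ ch :: s := by simp [Ne.symm hchne, hds]
            have h1 : decide ('$' ∈ ch :: s) = decide ('$' ∈ s) := by simp [Ne.symm hchne]
            have h2 : lvpDres s = lvpDres (ch :: s) := by simp [lvpDres, hds, hdsc]
            have h3 : (lvpAfterD s).all lvpWordc = (lvpAfterD (ch :: s)).all lvpWordc := by
              rw [lvpAfterD_of_not_mem _ hdsc, lvpAfterD_of_not_mem _ hds]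
              simp [List.all_cons, lvpWordc, hw]
            rw [h2, h3, ← h1]
            exact IH

theorem lvpAlt_eq_spec (cs : List Char) :
    lvpScan cs cs.length false false none true = lvpSpec cs := by
  have h := lvpScan_spec cs cs.length (le_refl _) (by simp [lvpPairFree])
  simpa [lvpDres, lvpAfterD] using h

theorem lvpGo_zero (s sub : List Char) :
    PySem.Chars.rfind.go s sub 0 = if sub.isPrefixOf s then 0 else -1 := rfl

theorem lvpGo_succ (s sub : List Char) (j : Nat) :
    PySem.Chars.rfind.go s sub (j + 1) =
      if sub.isPrefixOf (s.drop (j + 1)) then ((j : Int) + 1) else PySem.Chars.rfind.go s sub j := by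
  simp [PySem.Chars.rfind.go]

theorem lvpGo_neg_iff (s sub : List Char) (j : Nat) :
    PySem.Chars.rfind.go s sub j = -1 ↔ ∀ i ≤ j, sub.isPrefixOf (s.drop i) = false := by
  induction j with
  | zero =>
    rw [lvpGo_zero]
    constructor
    · intro h i hi
      interval_cases i
      by_cases hp : sub.isPrefixOf s <;> simp [hp] at h ⊢
    · intro h
      have := h 0 (le_refl 0)
      simp only [List.drop_zero] at this
      simp [this]
  | succ j ih =>
    rw [lvpGo_succ]
    by_cases hp : sub.isPrefixOf (s.drop (j+1)) = true
    · simp only [hp, if_true]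
      constructor
      · intro h; omega
      · intro h; exact absurd (h (j+1) (le_refl _)) (by simp [hp])
    · rw [Bool.not_eq_true] at hp
      simp only [hp, Bool.false_eq_true, if_false]
      rw [ih]
      constructor
      · intro h i hi
        rcases Nat.lt_or_ge i (j+1) with h1 | h1
        · exact h i (by omega)
        · have : i = j + 1 := by omega
          simp [this, hp]
      · intro h i hi; exact h i (by omega)

theorem lvpGo_pos (s sub : List Char) (j : Nat) (h : PySem.Chars.rfind.go s sub j ≠ -1) :
    ∃ i : Nat, PySem.Chars.rfind.go s sub j = (i : Int) ∧ i ≤ j ∧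
      sub.isPrefixOf (s.drop i) = true ∧
      ∀ k, i < k → k ≤ j → sub.isPrefixOf (s.drop k) = false := by
  induction j with
  | zero =>
    rw [lvpGo_zero] at *
    by_cases hp : sub.isPrefixOf s = true
    · exact ⟨0, by simp [hp], le_refl 0, by simpa using hp, by omega⟩
    · simp [hp] at h
  | succ j ih =>
    rw [lvpGo_succ] at *
    by_cases hp : sub.isPrefixOf (s.drop (j+1)) = true
    · refine ⟨j+1, by simp [hp], le_refl _, hp, ?_⟩
      intro k hk1 hk2; omega
    · rw [Bool.not_eq_true] at hp
      simp only [hp, Bool.false_eq_true, if_false] at h ⊢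
      obtain ⟨i, h1, h2, h3, h4⟩ := ih h
      refine ⟨i, h1, by omega, h3, ?_⟩
      intro k hk1 hk2
      rcases Nat.lt_or_ge k (j+1) with h5 | h5
      · exact h4 k hk1 (by omega)
      · have : k = j+1 := by omega
        simp [this, hp]

theorem lvpSingleton_prefix (c : Char) (l : List Char) :
    [c].isPrefixOf l = true ↔ l.head? = some c := by
  cases l with
  | nil => simp [List.isPrefixOf]
  | cons a t =>
    simp only [List.isPrefixOf, List.head?_cons, Option.some.injEq, Bool.and_true]
    rw [beq_iff_eq]
    exact eq_comm

theorem lvpIsIn_singleton (c : Char) (s : List Char) :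
    PySem.Chars.isIn [c] s = decide (c ∈ s) := by
  by_cases h : c ∈ s
  · simp only [h, decide_true]
    exact (PySem.Chars.isIn_iff_infix _ _).mpr ((List.singleton_infix_iff c s).mpr h)
  · simp only [h, decide_false]
    rw [PySem.Chars.isIn_eq_false_iff]
    intro hinf
    exact h ((List.singleton_infix_iff c s).mp hinf)

theorem lvpPairFree_of (cs : List Char)
    (h : ∀ i, (['$', '{'] : List Char).isPrefixOf (cs.drop i) = false) :
    lvpPairFree cs = true := by
  induction cs with
  | nil => rfl
  | cons a t ih =>
    cases t with
    | nil => rfl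
    | cons b t' =>
      have h0 := h 0
      simp only [List.drop_zero, List.isPrefixOf, Bool.and_true, Bool.and_eq_false_iff,
        beq_eq_false_iff_ne, ne_eq] at h0
      have ht := ih (fun i => by simpa using h (i + 1))
      simp only [lvpPairFree, ht, Bool.and_true, Bool.not_eq_true', Bool.and_eq_false_iff]
      rcases h0 with h0 | h0
      · left
        simp only [decide_eq_false_iff_not]
        intro hh; exact h0 hh.symm
      · right
        simp only [decide_eq_false_iff_not]
        intro hh; exact h0 hh.symm

-- no '$' in cs iff rfind['$'] fails, etc.

theorem lvpNoDollar (cs : List Char) (h : PySem.Chars.rfind.go cs ['$'] cs.length = -1) :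
    '$' ∉ cs := by
  intro hm
  obtain ⟨i, hi, hgi⟩ := List.getElem_of_mem hm
  have hp : ([('$' : Char)]).isPrefixOf (cs.drop i) = true := by
    rw [lvpSingleton_prefix, List.head?_drop]
    simp [hi, hgi]
  have := (lvpGo_neg_iff cs ['$'] cs.length).mp h i (le_of_lt hi)
  rw [this] at hp; exact Bool.false_ne_true hp

theorem lvpDollar_eq (cs : List Char) :
    (if PySem.Chars.rfind cs ['$'] < 0 then none
     else
       let vp := PySem.List.slice cs (some (PySem.Chars.rfind cs ['$'] + 1)) none
       if vp = [] then none
       else if vp.all (fun c => PySem.Chars.isalnum c || (c == '_' || c == ':')) then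
         some (String.ofList vp)
       else none) = (lvpDres cs).map String.ofList := by
  by_cases hA : PySem.Chars.rfind.go cs ['$'] cs.length = -1
  · have hnm := lvpNoDollar cs hA
    simp [PySem.Chars.rfind, hA, lvpDres, hnm]
  · obtain ⟨i, h1, h2, h3, h4⟩ := lvpGo_pos cs ['$'] cs.length hA
    rw [lvpSingleton_prefix, List.head?_drop] at h3
    have hi : i < cs.length := by
      by_contra hlt
      rw [List.getElem?_eq_none (by omega)] at h3
      exact Option.some_ne_none _ h3.symm
    have hgi : cs[i] = '$' := by
      simpa [List.getElem?_eq_getElem hi] using h3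
    have hno : '$' ∉ cs.drop (i + 1) := by
      intro hm
      obtain ⟨j, hj, hgj⟩ := List.getElem_of_mem hm
      rw [List.getElem_drop] at hgj
      have hjlen : i + 1 + j < cs.length := by
        have := hj; simp [List.length_drop] at this; omega
      have hp : ([('$' : Char)]).isPrefixOf (cs.drop (i + 1 + j)) = true := by
        rw [lvpSingleton_prefix, List.head?_drop]
        simp [hjlen, hgj]
      have := h4 (i + 1 + j) (by omega) (by omega)
      rw [this] at hp; exact Bool.false_ne_true hp
    have hsplit : cs = cs.take i ++ '$' :: cs.drop (i + 1) := by
      conv_lhs => rw [← List.take_append_drop i cs]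
      rw [List.drop_eq_getElem_cons hi, hgi]
    have hafter : lvpAfterD cs = cs.drop (i + 1) := by
      have := lvpAfterD_append_dollar _ hno (cs.take i)
      rw [← hsplit] at this; exact this
    have hmem : '$' ∈ cs := by rw [hsplit]; simp
    have hr : PySem.Chars.rfind cs ['$'] = (i : Int) := h1
    rw [hr]
    have hsl : PySem.List.slice cs (some ((i : Int) + 1)) none = cs.drop (i + 1) := by
      rw [show ((i : Int) + 1) = ((i + 1 : Nat) : Int) by push_cast; ring,
        PySem.List.slice_from_natCast]
    rw [if_neg (by omega)]
    simp only [hsl, lvpDres, hmem, if_true, hafter]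
    rw [show (fun c => PySem.Chars.isalnum c || (c == '_' || c == ':')) = lvpWordc from rfl]
    by_cases he : cs.drop (i + 1) = [] <;>
      by_cases hw : (cs.drop (i + 1)).all lvpWordc = true <;>
      simp [he, hw]

theorem lvpA_eq_spec (cs : List Char) :
    (let openBraceIndex := PySem.Chars.rfind cs ['$', '{']
     if 0 ≤ openBraceIndex ∧
         PySem.Chars.isIn ['}'] (PySem.List.slice cs (some (openBraceIndex + 2)) none) = false then
       some (String.ofList (PySem.List.slice cs (some (openBraceIndex + 2)) none))
     else
       let dollarIndex := PySem.Chars.rfind cs ['$']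
       if dollarIndex < 0 then none
       else
         let variablePrefix := PySem.List.slice cs (some (dollarIndex + 1)) none
         if variablePrefix = [] then none
         else if variablePrefix.all (fun c => PySem.Chars.isalnum c || (c == '_' || c == ':')) then
           some (String.ofList variablePrefix)
         else none) = (lvpSpec cs).map String.ofList := by
  by_cases hA : PySem.Chars.rfind.go cs ['$', '{'] cs.length = -1
  · have hpf : lvpPairFree cs = true := by
      apply lvpPairFree_of
      intro j
      by_cases hj : j ≤ cs.length
      · exact (lvpGo_neg_iff cs ['$', '{'] cs.length).mp hA j hj
      · rw [List.drop_eq_nil_of_le (by omega)]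
        rfl
    have hlps := lvpPairFree_lps cs hpf
    have hr : PySem.Chars.rfind cs ['$', '{'] = -1 := hA
    rw [show lvpSpec cs = lvpDres cs by simp [lvpSpec, hlps]]
    simp only [hr]
    rw [if_neg (by omega)]
    exact lvpDollar_eq cs
  · obtain ⟨i, h1, h2, h3, h4⟩ := lvpGo_pos cs ['$', '{'] cs.length hA
    rw [List.isPrefixOf_iff_prefix] at h3
    obtain ⟨u, hu⟩ := h3
    simp only [List.cons_append, List.nil_append] at hu
    have hlen : i + 2 ≤ cs.length := by
      have := congrArg List.length hu
      simp [List.length_drop] at this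
      omega
    have hu2 : cs.drop (i + 1) = '{' :: u := by
      rw [← List.tail_drop, ← hu, List.tail_cons]
    have hu3 : cs.drop (i + 2) = u := by
      rw [show i + 2 = (i + 1) + 1 from rfl, ← List.tail_drop, hu2, List.tail_cons]
    have hnp : lvpPairFree ('{' :: u) = true := by
      rw [← hu2]
      apply lvpPairFree_of
      intro j
      rw [List.drop_drop]
      by_cases hj : i + 1 + j ≤ cs.length
      · exact h4 (i + 1 + j) (by omega) hj
      · rw [List.drop_eq_nil_of_le (by omega)]
        rfl
    have hsplit : cs = cs.take i ++ '$' :: '{' :: u := by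
      conv_lhs => rw [← List.take_append_drop i cs]
      rw [← hu]
    have hlps : lvpLps cs = some u := by
      conv_lhs => rw [hsplit]
      exact lvpPair_lps u hnp (cs.take i)
    have hr : PySem.Chars.rfind cs ['$', '{'] = (i : Int) := h1
    have hsl : PySem.List.slice cs (some ((i : Int) + 2)) none = u := by
      rw [show ((i : Int) + 2) = ((i + 2 : Nat) : Int) by push_cast; ring,
        PySem.List.slice_from_natCast, hu3]
    simp only [hr, hsl]
    rw [lvpIsIn_singleton]
    rw [show lvpSpec cs = if '}' ∈ u then lvpDres cs else some u by simp [lvpSpec, hlps]]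
    by_cases hbr : '}' ∈ u
    · rw [if_neg (by simp [hbr]), if_pos hbr]
      exact lvpDollar_eq cs
    · rw [if_pos ⟨by omega, by simp [hbr]⟩, if_neg hbr]
      rfl

-- ===== VERDICT (by name: the statement is the Claim_ definition above) =====
theorem live_variable_prefix_py_spec : Claim_equal_live_variable_prefix_py := by
  intro s _
  unfold Spec_live_variable_prefix_py live_variable_prefix_py live_variable_prefix_py_alt
  by_cases hg : (PySem.Chars.endswith s.toList ['$', '{'] || PySem.Chars.endswith s.toList ['$']) = true
  · simp [hg]
  · simp only [Bool.not_eq_true] at hg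
    simp only [hg, Bool.false_eq_true, if_false]
    rw [lvpAlt_eq_spec, lvpA_eq_spec]
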